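-- pv_equiv track=rewrite | github.com/seanwong1/leetcode-questions | findTheNearestPointThatHasTheSameXOrYCoordinate.py | nearestValidPoint
-- ===== SOURCE A (Python) =====
-- from typing import List
--
-- def nearestValidPoint(x: int, y: int, points: List[List[int]]) -> int:
--   result = -1
--   prev_manhattan = -1
--
--   for index, point in enumerate(points):
--     x2, y2 = point
--
--     if x2 == x or y2 == y:
--       manhattan = abs(x - x2) + abs(y - y2)
--       if result == -1:
--         result = index
--         prev_manhattan = manhattan
--       elif manhattan < prev_manhattan:
--         result = index
--         prev_manhattan = manhattan
--
--   return result
-- ===== SOURCE B (Python) =====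
-- def nearestValidPoint(x, y, points):
--     dists = [abs(x - px) + abs(y - py) if px == x or py == y else None
--              for px, py in points]
--     valid = [d for d in dists if d is not None]
--     if not valid:
--         return -1
--     return dists.index(min(valid))
-- ===== Notes on version B (the rewrite author's own statement) =====
-- stated objective: alternative
-- what changed: Replaces the single interleaved scan with a running best (two mutable state variables and a sentinel) by three staged passes: map every point to its Manhattan distance or None, filter the valid distances, then take the builtin min and locate its first position with list.index instead of tracking any index during the scan.
import Mathlib
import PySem

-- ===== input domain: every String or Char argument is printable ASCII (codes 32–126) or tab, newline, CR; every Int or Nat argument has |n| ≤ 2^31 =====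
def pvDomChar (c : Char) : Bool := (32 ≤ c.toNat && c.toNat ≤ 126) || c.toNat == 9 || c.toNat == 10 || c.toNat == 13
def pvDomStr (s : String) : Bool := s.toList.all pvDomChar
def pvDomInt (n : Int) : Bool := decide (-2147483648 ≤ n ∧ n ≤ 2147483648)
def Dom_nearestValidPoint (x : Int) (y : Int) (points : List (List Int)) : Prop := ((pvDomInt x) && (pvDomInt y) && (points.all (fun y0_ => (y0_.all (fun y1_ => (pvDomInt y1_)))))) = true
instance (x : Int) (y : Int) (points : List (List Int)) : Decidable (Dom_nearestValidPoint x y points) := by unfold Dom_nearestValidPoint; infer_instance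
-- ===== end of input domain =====

-- B replaces A's interleaved running-best scan by staged passes: map points to optional distances, filter, builtin min, then a first-index lookup; same O(n) cost, alternative decomposition.


-- ===== PORT A =====
-- loop body of A: 'x2, y2 = point' is exact under Pre_ (every point has length 2)
def pvStepA (x : Int) (y : Int) (st : Int × Int) (ip : Int × List Int) : Int × Int :=
  let x2 := PySem.List.pyGetD ip.2 0 0
  let y2 := PySem.List.pyGetD ip.2 1 0
  if x2 = x ∨ y2 = y then
    let manhattan := |x - x2| + |y - y2|
    if st.1 = -1 then (ip.1, manhattan)
    else if manhattan < st.2 then (ip.1, manhattan)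
    else st
  else st

def nearestValidPoint (x : Int) (y : Int) (points : List (List Int)) : Int :=
  ((PySem.List.enumerate points 0).foldl (pvStepA x y) (-1, -1)).1

-- ===== PORT B =====
-- comprehension body of B: 'for px, py in points' unpacking is exact under Pre_;
-- maps a point to its Manhattan distance when valid, None otherwise
def pvDist (x : Int) (y : Int) (p : List Int) : Option Int :=
  let px := PySem.List.pyGetD p 0 0
  let py := PySem.List.pyGetD p 1 0
  if px = x ∨ py = y then some (|x - px| + |y - py|) else none

def nearestValidPoint_alt (x : Int) (y : Int) (points : List (List Int)) : Int :=
  let dists := points.map (pvDist x y)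
  let valid := dists.filterMap id
  match PySem.List.min? valid (fun d => d) with
  | none => -1
  | some m =>
      match PySem.List.index? dists (some m) with
      | some j => (j : Int)
      | none => -1   -- unreachable: min(valid) occurs in dists

-- ===== PRECONDITION & SPEC =====
-- Pre_ excludes only inputs where some point does not have exactly 2 coordinates:
-- there Python's unpacking 'x2, y2 = point' / 'for px, py in points' raises ValueError (in A and in B alike).
def Pre_nearestValidPoint (x : Int) (y : Int) (points : List (List Int)) : Prop :=
  points.all (fun p => p.length == 2) = true
instance (x : Int) (y : Int) (points : List (List Int)) : Decidable (Pre_nearestValidPoint x y points) := by unfold Pre_nearestValidPoint; infer_instance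

def pvWitness_nearestValidPoint : Int × Int × List (List Int) := (1, 2, [[3, 2], [1, 5], [4, 4]])

def Spec_nearestValidPoint (x : Int) (y : Int) (points : List (List Int)) (out : Int) : Prop := out = nearestValidPoint_alt x y points
instance (x : Int) (y : Int) (points : List (List Int)) (out : Int) : Decidable (Spec_nearestValidPoint x y points out) := by unfold Spec_nearestValidPoint; infer_instance

-- ===== CLAIM =====
def Claim_equal_nearestValidPoint : Prop := ∀ (x : Int) (y : Int) (points : List (List Int)), Dom_nearestValidPoint x y points → Pre_nearestValidPoint x y points → Spec_nearestValidPoint x y points (nearestValidPoint x y points)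

-- ===== LEMMAS AND PROOFS =====

-- A's step, rephrased over the optional-distance list
def pvStepD (st : Int × Int) (id_ : Int × Option Int) : Int × Int :=
  match id_.2 with
  | none => st
  | some d =>
    if st.1 = -1 then (id_.1, d)
    else if d < st.2 then (id_.1, d)
    else st

-- first index and value of the minimum among the 'some' entries
def pvArgmin : List (Option Int) → Option (Nat × Int)
  | [] => none
  | none :: t => (pvArgmin t).map (fun p => (p.1 + 1, p.2))
  | some d :: t =>
    match pvArgmin t with
    | none => some (0, d)
    | some (j, m) => if m < d then some (j + 1, m) else some (0, d)

lemma pvArgmin_cons_none (t : List (Option Int)) :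
    pvArgmin (none :: t) = (pvArgmin t).map (fun p => (p.1 + 1, p.2)) := rfl

lemma pvArgmin_cons_some (d : Int) (t : List (Option Int)) :
    pvArgmin (some d :: t) =
      (match pvArgmin t with
       | none => some (0, d)
       | some (j, m) => if m < d then some (j + 1, m) else some (0, d)) := rfl

lemma pvBridge (x y : Int) (pts : List (List Int)) : ∀ (s : Int) (st : Int × Int),
    (PySem.List.enumerate pts s).foldl (pvStepA x y) st =
    (PySem.List.enumerate (pts.map (pvDist x y)) s).foldl pvStepD st := by
  induction pts with
  | nil => intro s st; simp [PySem.List.enumerate]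
  | cons p t ih =>
    intro s st
    rw [List.map_cons, PySem.List.enumerate_cons, PySem.List.enumerate_cons,
        List.foldl_cons, List.foldl_cons]
    have hstep : pvStepA x y st (s, p) = pvStepD st (s, pvDist x y p) := by
      unfold pvStepA pvStepD pvDist
      by_cases hv : (PySem.List.pyGetD p 0 0 = x ∨ PySem.List.pyGetD p 1 0 = y) <;> simp [hv]
    rw [hstep, ih]

lemma pvFoldD : ∀ (ds : List (Option Int)) (s r md : Int), 0 ≤ s →
    (PySem.List.enumerate ds s).foldl pvStepD (r, md) =
    (match pvArgmin ds with
     | none => (r, md)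
     | some (j, m) => if r = -1 ∨ m < md then (s + (j : Int), m) else (r, md)) := by
  intro ds
  induction ds with
  | nil => intro s r md _; simp [PySem.List.enumerate, pvArgmin]
  | cons o t ih =>
    intro s r md hs
    rw [PySem.List.enumerate_cons, List.foldl_cons]
    cases o with
    | none =>
      have hst : pvStepD (r, md) (s, none) = (r, md) := rfl
      rw [hst, ih (s + 1) r md (by omega), pvArgmin_cons_none]
      cases hA : pvArgmin t with
      | none => rfl
      | some p =>
        obtain ⟨j, m⟩ := p
        simp only [Option.map_some]
        split_ifs <;> simp only [Prod.mk.injEq, and_true] <;> push_cast <;> omega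
    | some d =>
      have hst : pvStepD (r, md) (s, some d) =
          (if r = -1 then (s, d) else if d < md then (s, d) else (r, md)) := rfl
      rw [hst, pvArgmin_cons_some]
      cases hA : pvArgmin t with
      | none =>
        split_ifs with h1 h2 <;>
          rw [ih (s + 1) _ _ (by omega), hA] <;>
          simp <;> omega
      | some p =>
        obtain ⟨j, m⟩ := p
        by_cases hm : m < d <;>
          split_ifs with h1 h2 <;>
          rw [ih (s + 1) _ _ (by omega), hA] <;>
          simp only [hm, ite_true, ite_false, or_true, or_false] <;>
          split_ifs <;> simp only [Prod.mk.injEq, and_true] <;> push_cast <;> omega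

lemma pvFoldlMin (l : List Int) : ∀ (a b : Int),
    l.foldl min (min a b) = min a (l.foldl min b) := by
  induction l with
  | nil => intro a b; rfl
  | cons c t ih =>
    intro a b
    simp only [List.foldl_cons]
    rw [min_assoc, ih]

lemma pvMinChar : ∀ (ds : List (Option Int)),
    PySem.List.min? (ds.filterMap id) (fun d => d) = (pvArgmin ds).map Prod.snd := by
  intro ds
  induction ds with
  | nil =>
    rw [show pvArgmin [] = none from rfl]
    exact (PySem.List.min?_eq_none_iff _ _).mpr rfl
  | cons o t ih =>
    cases o with
    | none =>
      rw [List.filterMap_cons_none rfl, ih, pvArgmin_cons_none]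
      cases pvArgmin t <;> rfl
    | some d =>
      rw [List.filterMap_cons_some (show id (some d) = some d from rfl),
          PySem.List.min?_id_cons, pvArgmin_cons_some]
      cases hA : pvArgmin t with
      | none =>
        have he : t.filterMap id = [] := by
          rw [← PySem.List.min?_eq_none_iff (t.filterMap id) (fun d => d), ih, hA]; rfl
        rw [he]
        rfl
      | some p =>
        obtain ⟨j, m⟩ := p
        have hm : PySem.List.min? (t.filterMap id) (fun d => d) = some m := by
          rw [ih, hA]; rfl
        cases hf : t.filterMap id with
        | nil =>
          rw [hf, (PySem.List.min?_eq_none_iff ([] : List Int) (fun d => d)).mpr rfl] at hm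
          simp at hm
        | cons v vt =>
          rw [hf, PySem.List.min?_id_cons] at hm
          have hfold : vt.foldl min v = m := by injection hm
          rw [List.foldl_cons, pvFoldlMin, hfold]
          show some (min d m) = Option.map Prod.snd (if m < d then some (j + 1, m) else some (0, d))
          by_cases h : m < d
          · rw [if_pos h, Option.map_some]
            have : min d m = m := by omega
            rw [this]
          · rw [if_neg h, Option.map_some]
            have : min d m = d := by omega
            rw [this]

lemma pvIdxChar : ∀ (ds : List (Option Int)) (j : Nat) (m : Int),
    pvArgmin ds = some (j, m) → PySem.List.index? ds (some m) = some j := by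
  intro ds
  induction ds with
  | nil => intro j m h; simp [pvArgmin] at h
  | cons o t ih =>
    intro j m h
    cases o with
    | none =>
      rw [pvArgmin_cons_none] at h
      cases hA : pvArgmin t with
      | none => rw [hA] at h; simp at h
      | some p =>
        obtain ⟨j', m'⟩ := p
        rw [hA, Option.map_some] at h
        have h1 : j' + 1 = j := by injection h with h'; exact congrArg Prod.fst h'
        have h2 : m' = m := by injection h with h'; exact congrArg Prod.snd h'
        subst h2
        have hne : (none : Option Int) ≠ some m' := by simp
        rw [PySem.List.index?_cons_of_ne _ hne, ih j' m' (by rw [hA])]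
        simp [h1]
    | some d =>
      rw [pvArgmin_cons_some] at h
      cases hA : pvArgmin t with
      | none =>
        rw [hA] at h
        have h' : some ((0 : Nat), d) = some (j, m) := h
        have h1 : (0 : Nat) = j := by injection h' with h''; exact congrArg Prod.fst h''
        have h2 : d = m := by injection h' with h''; exact congrArg Prod.snd h''
        subst h1 h2
        exact PySem.List.index?_cons_self _ _
      | some p =>
        obtain ⟨j', m'⟩ := p
        rw [hA] at h
        have h' : (if m' < d then some (j' + 1, m') else some ((0 : Nat), d)) = some (j, m) := h
        by_cases hm : m' < d
        · rw [if_pos hm] at h'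
          have h1 : j' + 1 = j := by injection h' with h''; exact congrArg Prod.fst h''
          have h2 : m' = m := by injection h' with h''; exact congrArg Prod.snd h''
          subst h2
          have hne : (some d : Option Int) ≠ some m' := by simp; omega
          rw [PySem.List.index?_cons_of_ne _ hne, ih j' m' (by rw [hA])]
          simp [h1]
        · rw [if_neg hm] at h'
          have h1 : (0 : Nat) = j := by injection h' with h''; exact congrArg Prod.fst h''
          have h2 : d = m := by injection h' with h''; exact congrArg Prod.snd h''
          subst h1 h2
          exact PySem.List.index?_cons_self _ _

-- ===== VERDICT =====
theorem nearestValidPoint_spec : Claim_equal_nearestValidPoint := by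
  intro x y points _ _
  unfold Spec_nearestValidPoint nearestValidPoint
  have halt : nearestValidPoint_alt x y points =
      (match PySem.List.min? ((points.map (pvDist x y)).filterMap id) (fun d => d) with
       | none => -1
       | some m =>
         match PySem.List.index? (points.map (pvDist x y)) (some m) with
         | some j => (j : Int)
         | none => -1) := rfl
  rw [halt, pvBridge, pvFoldD _ 0 (-1) (-1) (by omega), pvMinChar]
  cases hA : pvArgmin (points.map (pvDist x y)) with
  | none => rfl
  | some p =>
    obtain ⟨j, m⟩ := p
    have hidx := pvIdxChar _ j m hA
    show (if (-1 : Int) = -1 ∨ m < -1 then ((0 : Int) + (j : Int), m) else (-1, -1)).1 =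
      (match PySem.List.index? (points.map (pvDist x y)) (some m) with
       | some j => (j : Int)
       | none => -1)
    rw [hidx]
    norm_num
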